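-- pv_equiv track=rewrite | github.com/zhengyaoyaoyao/leetcode | 周赛合集/第313场周赛/6195. 对字母串可执行的最大删除数.py | deleteString
-- ===== SOURCE A (Python) =====
-- def deleteString(s: str) -> int:
--     n = len(s)
--     #这个lcp表格就记录了所有的从i和j开始的公共前缀。
--     lcp = [[0] *(n+1) for _ in range(n+1)]
--     for i in range(n-1,-1,-1):
--         for j in range(n-1,-1,-1):
--             if s[i] ==s[j]:
--                 lcp[i][j] =lcp[i+1][j+1] +1
--
--     f = [0]*n
--     for i in range(n-1,-1,-1):
--         # i+2*j<= n
--         # j<= (n-i)//2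
--         for j in range(1,(n-i)//2+1):
--             # 只要两个公共前缀大于j那么就取最大的。
--             if lcp[i][i+j]>=j:
--                 f[i] = max(f[i],f[i+j])
--         f[i] +=1
--     return f[0]
-- ===== SOURCE B (Python) =====
-- def deleteString(s: str) -> int:
--     # Same bottom-up DP, but no O(n^2) LCP table: test the prefix equality
--     # directly with a slice comparison.
--     n = len(s)
--     f = [0] * n
--     for i in range(n - 1, -1, -1):
--         best = 0
--         for j in range(1, (n - i) // 2 + 1):
--             if s[i:i + j] == s[i + j:i + 2 * j] and f[i + j] > best:
--                 best = f[i + j]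
--         f[i] = best + 1
--     return f[0]
-- ===== Notes on version B (the rewrite author's own statement) =====
-- stated objective: simpler
-- what changed: B drops A's precomputed (n+1)x(n+1) LCP table and runs the same bottom-up DP testing the prefix condition directly with the slice comparison s[i:i+j] == s[i+j:i+2*j].
import Mathlib
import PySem

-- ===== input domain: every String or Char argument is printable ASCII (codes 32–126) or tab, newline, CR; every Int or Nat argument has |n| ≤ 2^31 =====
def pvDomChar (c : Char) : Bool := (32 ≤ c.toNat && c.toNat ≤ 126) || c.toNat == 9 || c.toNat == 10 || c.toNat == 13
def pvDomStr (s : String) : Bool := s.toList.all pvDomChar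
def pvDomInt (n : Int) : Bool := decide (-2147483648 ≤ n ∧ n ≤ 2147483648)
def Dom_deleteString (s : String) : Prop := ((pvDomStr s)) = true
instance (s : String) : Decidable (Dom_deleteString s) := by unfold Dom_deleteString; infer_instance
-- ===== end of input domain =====

-- B drops A's O(n^2) precomputed LCP table and tests the prefix condition of the same
-- bottom-up DP directly with a slice comparison (objective: simpler, O(n) space; not claimed faster).

-- ===== PORT A =====
-- Port notes: every index A uses is in range (i, j < n; i+j < n), so `lcp[i][j] = …`,
-- `f[i] = …` and the reads are ported exactly with List.set / List.getD, and the
-- descending `range(n-1,-1,-1)` as a fold over (List.range n).reverse.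
def pvG2 (t : List (List Int)) (i j : Nat) : Int := (t.getD i []).getD j 0

def pvLcpStep (l : List Char) (i : Nat) (t : List (List Int)) (j : Nat) : List (List Int) :=
  if l.getD i ' ' = l.getD j ' ' then
    t.set i ((t.getD i []).set j (pvG2 t (i+1) (j+1) + 1))
  else t

def pvLcpOuter (l : List Char) (n : Nat) (t : List (List Int)) (i : Nat) : List (List Int) :=
  ((List.range n).reverse).foldl (pvLcpStep l i) t

def pvFInnerA (lcp : List (List Int)) (i : Nat) (f : List Int) (j : Nat) : List Int :=
  if (j : Int) ≤ pvG2 lcp i (i+j) then f.set i (max (f.getD i 0) (f.getD (i+j) 0)) else f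

def pvFStepA (lcp : List (List Int)) (n : Nat) (f : List Int) (i : Nat) : List Int :=
  let f' := (List.range' 1 ((n-i)/2)).foldl (pvFInnerA lcp i) f
  f'.set i (f'.getD i 0 + 1)

def deleteString (s : String) : Int :=
  let l := s.toList
  let n := l.length
  let lcp := ((List.range n).reverse).foldl (pvLcpOuter l n)
      (List.replicate (n+1) (List.replicate (n+1) (0:Int)))
  let f := ((List.range n).reverse).foldl (pvFStepA lcp n) (List.replicate n (0:Int))
  f.getD 0 0

-- ===== PORT B =====
def pvFStepB (l : List Char) (n : Nat) (f : List Int) (i : Nat) : List Int :=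
  let best := (List.range' 1 ((n-i)/2)).foldl (fun b j =>
      if PySem.List.slice l (some (i:Int)) (some ((i+j : Nat) : Int)) =
         PySem.List.slice l (some ((i+j : Nat) : Int)) (some ((i+2*j : Nat) : Int)) ∧ f.getD (i+j) 0 > b
      then f.getD (i+j) 0 else b) 0
  f.set i (best + 1)

def deleteString_alt (s : String) : Int :=
  let l := s.toList
  let n := l.length
  let f := ((List.range n).reverse).foldl (pvFStepB l n) (List.replicate n (0:Int))
  f.getD 0 0

-- ===== PRECONDITION & SPEC =====
-- Pre_ excludes only the empty string, on which Python A raises IndexError at `f[0]`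
-- (B raises there too).
def Pre_deleteString (s : String) : Prop := s ≠ ""
instance (s : String) : Decidable (Pre_deleteString s) := by unfold Pre_deleteString; infer_instance
def pvWitness_deleteString : String := "ab"

def Spec_deleteString (s : String) (out : Int) : Prop := out = deleteString_alt s
instance (s : String) (out : Int) : Decidable (Spec_deleteString s out) := by unfold Spec_deleteString; infer_instance

-- ===== CLAIM (what is proved, stated in full; the proofs are below) =====
def Claim_equal_deleteString : Prop := ∀ (s : String), Dom_deleteString s → Pre_deleteString s → Spec_deleteString s (deleteString s)

-- ===== LEMMAS AND PROOFS =====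

-- Reference function: length of the longest common prefix of two lists.
def lcpRef : List Char → List Char → Nat
  | a :: as, b :: bs => if a = b then lcpRef as bs + 1 else 0
  | _, _ => 0

theorem lcpRef_nil_right (a : List Char) : lcpRef a [] = 0 := by cases a <;> rfl


theorem lcpRef_ge_iff_take (j : Nat) (a b : List Char) (ha : j ≤ a.length) (hb : j ≤ b.length) :
    (j ≤ lcpRef a b) ↔ a.take j = b.take j := by
  induction j generalizing a b with
  | zero => simp
  | succ j ih =>
    cases a with
    | nil => simp at ha
    | cons x as =>
      cases b with
      | nil => simp at hb
      | cons y bs =>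
        simp only [List.length_cons, Nat.add_le_add_iff_right] at ha hb
        by_cases hxy : x = y
        · subst hxy
          simp only [lcpRef, List.take_succ_cons, List.cons.injEq, true_and]
          rw [if_true, ← ih as bs ha hb]
          omega
        · simp [lcpRef, hxy, List.take_succ_cons]

theorem pv_getD_set_self {α : Type} (l : List α) (i : Nat) (a d : α) (h : i < l.length) :
    (l.set i a).getD i d = a := by
  simp [List.getD, h]

theorem pv_getD_set_ne {α : Type} (l : List α) {i j : Nat} (a : α) (d : α) (h : i ≠ j) :
    (l.set i a).getD j d = l.getD j d := by
  simp [List.getD, h]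


theorem pv_getD_set {α : Type} (l : List α) (i j : Nat) (a d : α) (hlen : i < l.length) :
    (l.set i a).getD j d = if j = i then a else l.getD j d := by
  by_cases h : j = i
  · subst h; rw [if_pos rfl]; exact pv_getD_set_self l j a d hlen
  · rw [if_neg h]; exact pv_getD_set_ne l a d (fun e => h e.symm)

theorem pv_foldl_ext {α β : Type} (g1 g2 : β → α → β) (js : List α)
    (h : ∀ b j, j ∈ js → g1 b j = g2 b j) (b0 : β) : js.foldl g1 b0 = js.foldl g2 b0 := by
  induction js generalizing b0 with
  | nil => rfl
  | cons j js ih =>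
    rw [List.foldl_cons, List.foldl_cons, h b0 j List.mem_cons_self]
    exact ih (fun b j hj => h b j (List.mem_cons_of_mem _ hj)) _

theorem lcpRef_nil_left (b : List Char) : lcpRef [] b = 0 := by cases b <;> rfl

-- spec value of the lcp table, as an Int
def pvS (l : List Char) (i j : Nat) : Int := (lcpRef (l.drop i) (l.drop j) : Int)

theorem pvS_zero_left (l : List Char) (i j : Nat) (hi : l.length ≤ i) : pvS l i j = 0 := by
  unfold pvS
  rw [List.drop_eq_nil_of_le hi, lcpRef_nil_left]
  rfl

theorem pvS_zero_right (l : List Char) (i j : Nat) (hj : l.length ≤ j) : pvS l i j = 0 := by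
  unfold pvS
  rw [List.drop_eq_nil_of_le hj, lcpRef_nil_right]
  rfl

theorem pvS_step (l : List Char) (i j : Nat) (hi : i < l.length) (hj : j < l.length) :
    pvS l i j = if l.getD i ' ' = l.getD j ' ' then pvS l (i+1) (j+1) + 1 else 0 := by
  unfold pvS
  rw [List.drop_eq_getElem_cons hi, List.drop_eq_getElem_cons hj,
      List.getD_eq_getElem l ' ' hi, List.getD_eq_getElem l ' ' hj]
  simp only [lcpRef]
  split <;> push_cast <;> ring

def pvShape (n : Nat) (t : List (List Int)) : Prop :=
  t.length = n+1 ∧ ∀ row ∈ t, row.length = n+1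

theorem pvShape_row_len {n : Nat} {t : List (List Int)} (h : pvShape n t) {i : Nat}
    (hi : i < n+1) : (t.getD i []).length = n+1 := by
  obtain ⟨h1, h2⟩ := h
  have hlt : i < t.length := by omega
  rw [List.getD, List.getElem?_eq_getElem hlt]
  exact h2 _ (List.getElem_mem hlt)

theorem lcpStep_shape {l : List Char} {n i : Nat} {t : List (List Int)} (hs : pvShape n t)
    (hi : i < n) (j : Nat) : pvShape n (pvLcpStep l i t j) := by
  unfold pvLcpStep
  split
  · refine ⟨by simpa using hs.1, ?_⟩
    intro row hrow
    rcases List.mem_or_eq_of_mem_set hrow with h | h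
    · exact hs.2 _ h
    · subst h; rw [List.length_set]; exact pvShape_row_len hs (by omega)
  · exact hs

theorem lcpInner_ne (l : List Char) (i : Nat) (js : List Nat) (t : List (List Int)) (i' : Nat)
    (h : i' ≠ i) : ((js.foldl (pvLcpStep l i) t).getD i' []) = t.getD i' [] := by
  induction js generalizing t with
  | nil => rfl
  | cons j js ih =>
    rw [List.foldl_cons, ih]
    unfold pvLcpStep
    split
    · exact pv_getD_set_ne _ _ _ (fun e => h e.symm)
    · rfl

theorem lcpInner_shape {l : List Char} {n i : Nat} (js : List Nat) {t : List (List Int)}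
    (hs : pvShape n t) (hi : i < n) : pvShape n (js.foldl (pvLcpStep l i) t) := by
  induction js generalizing t with
  | nil => exact hs
  | cons j js ih => exact ih (lcpStep_shape hs hi j)

theorem lcpInner_get (l : List Char) (n i : Nat) (js : List Nat) (t : List (List Int))
    (hs : pvShape n t) (hi : i < n) (hjs : ∀ j ∈ js, j < n) (j : Nat) :
    pvG2 (js.foldl (pvLcpStep l i) t) i j =
      if j ∈ js ∧ l.getD i ' ' = l.getD j ' ' then pvG2 t (i+1) (j+1) + 1 else pvG2 t i j := by
  induction js generalizing t with
  | nil => simp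
  | cons j0 js ih =>
    have hj0 : j0 < n := hjs j0 List.mem_cons_self
    have hs1 : pvShape n (pvLcpStep l i t j0) := lcpStep_shape hs hi j0
    rw [List.foldl_cons, ih _ hs1 (fun j hj => hjs j (List.mem_cons_of_mem _ hj))]
    have hrow1 : (pvLcpStep l i t j0).getD (i+1) [] = t.getD (i+1) [] := by
      unfold pvLcpStep
      split
      · exact pv_getD_set_ne _ _ _ (by omega)
      · rfl
    have hrow1' : ∀ jj, pvG2 (pvLcpStep l i t j0) (i+1) jj = pvG2 t (i+1) jj := by
      intro jj; unfold pvG2; rw [hrow1]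
    have hself : pvG2 (pvLcpStep l i t j0) i j =
        if j = j0 ∧ l.getD i ' ' = l.getD j0 ' ' then pvG2 t (i+1) (j0+1) + 1 else pvG2 t i j := by
      unfold pvLcpStep
      split
      · next hc =>
        show ((t.set i ((t.getD i []).set j0 (pvG2 t (i+1) (j0+1) + 1))).getD i []).getD j 0 = _
        rw [pv_getD_set_self _ _ _ _ (by rw [hs.1]; omega),
            pv_getD_set _ _ _ _ _ (by rw [pvShape_row_len hs (by omega)]; omega)]
        by_cases hj : j = j0
        · subst hj; rw [if_pos rfl, if_pos ⟨rfl, hc⟩]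
        · rw [if_neg hj, if_neg (fun h => hj h.1)]; rfl
      · next hc =>
        rw [if_neg (fun (h : j = j0 ∧ l.getD i ' ' = l.getD j0 ' ') => hc h.2)]
    rw [hrow1' (j+1), hself]
    by_cases hmem : j ∈ js <;> by_cases hjeq : j = j0 <;>
      by_cases hc : l.getD i ' ' = l.getD j ' ' <;>
      simp_all [List.mem_cons]

-- invariant: rows ≥ k of the table hold the true lcp values, rows < k are still 0
def pvInv (l : List Char) (k : Nat) (t : List (List Int)) : Prop :=
  pvShape l.length t ∧ ∀ i j, pvG2 t i j = if k ≤ i then pvS l i j else 0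

theorem lcpOuter_step (l : List Char) (i : Nat) (t : List (List Int)) (hi : i < l.length)
    (h : pvInv l (i+1) t) : pvInv l i (pvLcpOuter l l.length t i) := by
  obtain ⟨hs, hval⟩ := h
  unfold pvLcpOuter
  refine ⟨lcpInner_shape _ hs hi, ?_⟩
  intro i' j
  by_cases hii : i' = i
  · subst hii
    rw [lcpInner_get l l.length i' _ t hs hi (by simp) j]
    simp only [List.mem_reverse, List.mem_range]
    rw [hval, hval]
    by_cases hjn : j < l.length
    · by_cases hc : l.getD i' ' ' = l.getD j ' '
      · rw [if_pos ⟨hjn, hc⟩, if_pos (by omega), if_pos (le_refl i'),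
            pvS_step l i' j hi hjn, if_pos hc]
      · rw [if_neg (by tauto), if_neg (by omega), if_pos (le_refl i'),
            pvS_step l i' j hi hjn, if_neg hc]
    · rw [if_neg (by tauto), if_neg (by omega), if_pos (le_refl i'),
          pvS_zero_right l i' j (by omega)]
  · unfold pvG2
    rw [lcpInner_ne l i _ t i' hii]
    have := hval i' j
    unfold pvG2 at this
    rw [this]
    by_cases hk : i ≤ i'
    · rw [if_pos (by omega), if_pos hk]
    · rw [if_neg (by omega), if_neg hk]

theorem lcp_table_fold (l : List Char) (m : Nat) (hm : m ≤ l.length) (t : List (List Int))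
    (h : pvInv l m t) :
    pvInv l 0 (((List.range m).reverse).foldl (pvLcpOuter l l.length) t) := by
  induction m generalizing t with
  | zero => simpa using h
  | succ m ih =>
    rw [List.range_succ, List.reverse_append]
    simp only [List.reverse_cons, List.reverse_nil, List.nil_append, List.singleton_append,
      List.foldl_cons]
    exact ih (by omega) _ (lcpOuter_step l m t (by omega) h)

theorem lcp_table (l : List Char) :
    pvInv l 0 (((List.range l.length).reverse).foldl (pvLcpOuter l l.length)
      (List.replicate (l.length+1) (List.replicate (l.length+1) (0:Int)))) := by
  apply lcp_table_fold l l.length (le_refl _)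
  constructor
  · refine ⟨by simp, ?_⟩
    intro row hrow
    rw [List.eq_of_mem_replicate hrow]
    simp
  · intro i j
    have hz : pvG2 (List.replicate (l.length+1) (List.replicate (l.length+1) (0:Int))) i j = 0 := by
      unfold pvG2
      have h1 : (List.replicate (l.length+1) (List.replicate (l.length+1) (0:Int))).getD i [] =
          if i < l.length+1 then List.replicate (l.length+1) (0:Int) else [] := by
        simp [List.getD, List.getElem?_replicate]; split <;> simp
      rw [h1]
      split
      · simp [List.getD, List.getElem?_replicate]; split <;> simp
      · rfl
    rw [hz]
    split
    · exact (pvS_zero_left l i j (by omega)).symm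
    · rfl

theorem cond_equiv (l : List Char) (i j : Nat) (hi : i < l.length) (hj1 : 1 ≤ j)
    (hj2 : j ≤ (l.length - i)/2) :
    ((j:Int) ≤ pvS l i (i+j)) ↔ ((l.drop i).take j = (l.drop (i+j)).take j) := by
  unfold pvS
  rw [Int.ofNat_le]
  exact lcpRef_ge_iff_take j _ _ (by rw [List.length_drop]; omega) (by rw [List.length_drop]; omega)

theorem stepA_collapse (lcp : List (List Int)) (i : Nat) (js : List Nat) (f : List Int)
    (hi : i < f.length) (hjs : ∀ j ∈ js, 1 ≤ j) :
    js.foldl (pvFInnerA lcp i) f =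
      f.set i (js.foldl (fun (b : Int) (j : Nat) => if (j:Int) ≤ pvG2 lcp i (i+j) then max b (f.getD (i+j) 0) else b)
        (f.getD i 0)) := by
  induction js generalizing f with
  | nil =>
    rw [List.foldl_nil, List.foldl_nil, List.getD_eq_getElem f 0 hi, List.set_getElem_self]
  | cons j0 js ih =>
    have hj0 : 1 ≤ j0 := hjs j0 List.mem_cons_self
    simp only [List.foldl_cons]
    by_cases h0 : (j0:Int) ≤ pvG2 lcp i (i+j0)
    · have hstep : pvFInnerA lcp i f j0 = f.set i (max (f.getD i 0) (f.getD (i+j0) 0)) := by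
        unfold pvFInnerA; rw [if_pos h0]
      rw [hstep, if_pos h0]
      set f1 := f.set i (max (f.getD i 0) (f.getD (i+j0) 0)) with hf1
      rw [ih f1 (by rw [hf1, List.length_set]; exact hi) (fun j hj => hjs j (List.mem_cons_of_mem _ hj))]
      have hgi : f1.getD i 0 = max (f.getD i 0) (f.getD (i+j0) 0) := pv_getD_set_self _ _ _ _ hi
      rw [hgi, hf1, List.set_set]
      congr 1
      apply pv_foldl_ext
      intro b j hj
      have hj1 : 1 ≤ j := hjs j (List.mem_cons_of_mem _ hj)
      rw [pv_getD_set_ne _ _ _ (by omega)]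
    · have hstep : pvFInnerA lcp i f j0 = f := by
        unfold pvFInnerA; rw [if_neg h0]
      rw [hstep, if_neg h0]
      exact ih f hi (fun j hj => hjs j (List.mem_cons_of_mem _ hj))

theorem step_eq (l : List Char) (lcp : List (List Int)) (hlcp : pvInv l 0 lcp) (i : Nat)
    (f : List Int) (hf : f.length = l.length) (hi : i < l.length) (h0 : f.getD i 0 = 0) :
    pvFStepA lcp l.length f i = pvFStepB l l.length f i := by
  unfold pvFStepA pvFStepB
  simp only []
  rw [stepA_collapse lcp i _ f (by omega) (fun j hj => (List.mem_range'_1.1 hj).1)]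
  rw [pv_getD_set_self _ _ _ _ (by omega), List.set_set, h0]
  congr 1
  congr 1
  apply pv_foldl_ext
  intro b j hj
  obtain ⟨hj1, hj2⟩ := List.mem_range'_1.1 hj
  have hcond : ((j:Int) ≤ pvG2 lcp i (i+j)) ↔
      (PySem.List.slice l (some (i:Int)) (some ((i+j : Nat) : Int)) =
       PySem.List.slice l (some ((i+j : Nat) : Int)) (some ((i+2*j : Nat) : Int))) := by
    rw [hlcp.2 i (i+j), if_pos (by omega)]
    rw [PySem.List.slice_natCast, PySem.List.slice_natCast]
    have e1 : i + j - i = j := by omega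
    have e2 : i + 2*j - (i + j) = j := by omega
    rw [e1, e2]
    exact cond_equiv l i j hi hj1 (by omega)
  by_cases hc : (j:Int) ≤ pvG2 lcp i (i+j)
  · rw [if_pos hc]
    by_cases hgt : f.getD (i+j) 0 > b
    · rw [if_pos ⟨hcond.1 hc, hgt⟩]
      exact max_eq_right (by omega)
    · rw [if_neg (fun h => hgt h.2)]
      exact max_eq_left (by omega)
  · rw [if_neg hc, if_neg (fun h => hc (hcond.2 h.1))]

theorem f_fold_eq (l : List Char) (lcp : List (List Int)) (hlcp : pvInv l 0 lcp) (m : Nat)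
    (hm : m ≤ l.length) (f : List Int) (hf : f.length = l.length)
    (hz : ∀ i, i < m → f.getD i 0 = 0) :
    ((List.range m).reverse).foldl (pvFStepA lcp l.length) f =
      ((List.range m).reverse).foldl (pvFStepB l l.length) f := by
  induction m generalizing f with
  | zero => rfl
  | succ m ih =>
    rw [List.range_succ, List.reverse_append]
    simp only [List.reverse_cons, List.reverse_nil, List.nil_append, List.singleton_append,
      List.foldl_cons]
    rw [step_eq l lcp hlcp m f hf (by omega) (hz m (by omega))]
    apply ih (by omega)
    · unfold pvFStepB
      simp only []
      rw [List.length_set]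
      exact hf
    · intro i hi
      unfold pvFStepB
      simp only []
      rw [pv_getD_set_ne _ _ _ (by omega)]
      exact hz i (by omega)

theorem pv_getD_replicate (n i : Nat) : (List.replicate n (0:Int)).getD i 0 = 0 := by
  simp [List.getD, List.getElem?_replicate]; split <;> simp

-- ===== VERDICT (by name: the statement is the Claim_ definition above) =====
theorem deleteString_spec : Claim_equal_deleteString := by
  intro s _ _
  unfold Spec_deleteString deleteString deleteString_alt
  simp only []
  rw [f_fold_eq s.toList _ (lcp_table s.toList) s.toList.length (le_refl _) _ (by simp)
      (fun i _ => pv_getD_replicate _ i)]
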